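-- pv_equiv track=rewrite | github.com/riteshranjansingh/smc_trading_system | core/data/historical_loader.py | _split_date_range
-- ===== SOURCE A (Python) =====
-- from typing import List, Dict, Optional, Tuple
--
-- def _split_date_range(start_timestamp: int, end_timestamp: int,
--                      max_candles: int = 2000) -> List[Tuple[int, int]]:
--     """
--     Split large date ranges into smaller chunks to respect API limits
--
--     Args:
--         start_timestamp: Start timestamp
--         end_timestamp: End timestamp
--         max_candles: Maximum candles per request (default: 2000)
--
--     Returns:
--         List of (start, end) timestamp tuples
--     """
--     # 15m timeframe = 900 seconds per candle
--     interval_seconds = 900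
--     max_duration = max_candles * interval_seconds
--
--     chunks = []
--     current_start = start_timestamp
--
--     while current_start < end_timestamp:
--         current_end = min(current_start + max_duration, end_timestamp)
--         chunks.append((current_start, current_end))
--         current_start = current_end
--
--     return chunks
-- ===== SOURCE B (Python) =====
-- from typing import List, Tuple
--
-- def _split_date_range(start_timestamp: int, end_timestamp: int,
--                       max_candles: int = 2000) -> List[Tuple[int, int]]:
--     max_duration = max_candles * 900
--     if end_timestamp <= start_timestamp:
--         n = 0
--     else:
--         n = (end_timestamp - start_timestamp + max_duration - 1) // max_duration
--     return [(start_timestamp + i * max_duration,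
--              min(start_timestamp + (i + 1) * max_duration, end_timestamp))
--             for i in range(n)]
-- ===== Notes on version B (the rewrite author's own statement) =====
-- stated objective: simpler
-- what changed: Replaces the running-cursor while loop with a precomputed chunk count (ceiling division) and a single comprehension computing each chunk by index arithmetic; Pre_ excludes max_candles <= 0 with start < end, where A's while loop never returns.
-- outside the precondition, e.g. on _split_date_range(0, 1800, 0): A does not finish within the time limit, B raises ZeroDivisionError; on _split_date_range(0, 1800, -1): A does not finish within the time limit, B returns []
import Mathlib
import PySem

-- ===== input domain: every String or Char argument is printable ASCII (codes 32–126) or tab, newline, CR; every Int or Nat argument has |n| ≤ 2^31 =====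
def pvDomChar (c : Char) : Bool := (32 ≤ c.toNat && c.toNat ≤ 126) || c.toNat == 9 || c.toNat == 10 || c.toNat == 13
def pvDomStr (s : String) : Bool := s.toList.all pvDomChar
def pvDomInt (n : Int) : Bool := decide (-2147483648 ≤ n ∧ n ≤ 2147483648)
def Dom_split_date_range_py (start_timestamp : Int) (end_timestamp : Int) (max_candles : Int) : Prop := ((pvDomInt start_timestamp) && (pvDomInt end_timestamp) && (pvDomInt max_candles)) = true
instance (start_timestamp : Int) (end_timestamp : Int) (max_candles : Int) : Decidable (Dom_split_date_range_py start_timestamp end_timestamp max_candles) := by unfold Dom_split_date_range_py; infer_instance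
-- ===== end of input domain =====

-- B replaces A's running-cursor while loop by a precomputed ceiling-division chunk count
-- and direct index arithmetic (objective: simpler).


-- ===== PORT A =====
-- A's while loop; the fuel only bounds the recursion (it never alters a value the loop
-- produces: under Pre_ the loop terminates well within it).
def pvLoopA (max_duration end_timestamp : Int) : Nat → Int → List (Int × Int) → List (Int × Int)
  | 0, _, chunks => chunks.reverse
  | fuel + 1, current_start, chunks =>
    if current_start < end_timestamp then
      let current_end := min (current_start + max_duration) end_timestamp
      pvLoopA max_duration end_timestamp fuel current_end ((current_start, current_end) :: chunks)
    else chunks.reverse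

def split_date_range_py (start_timestamp : Int) (end_timestamp : Int) (max_candles : Int) : List (Int × Int) :=
  let interval_seconds : Int := 900
  let max_duration := max_candles * interval_seconds
  pvLoopA max_duration end_timestamp ((end_timestamp - start_timestamp).toNat + 1) start_timestamp []

-- ===== PORT B =====
def split_date_range_py_alt (start_timestamp : Int) (end_timestamp : Int) (max_candles : Int) : List (Int × Int) :=
  let max_duration := max_candles * 900
  let n : Int :=
    if end_timestamp ≤ start_timestamp then 0
    else PySem.Int.floordiv (end_timestamp - start_timestamp + max_duration - 1) max_duration
  (List.range n.toNat).map (fun (i : Nat) =>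
    (start_timestamp + (i : Int) * max_duration,
     min (start_timestamp + ((i : Int) + 1) * max_duration) end_timestamp))

-- ===== PRECONDITION & SPEC =====
-- Pre_ excludes max_candles ≤ 0 together with start < end: there A never returns
-- (the while loop's cursor does not advance), and B raises ZeroDivisionError or returns [].
def Pre_split_date_range_py (start_timestamp : Int) (end_timestamp : Int) (max_candles : Int) : Prop :=
  start_timestamp < end_timestamp → 0 < max_candles
instance (start_timestamp : Int) (end_timestamp : Int) (max_candles : Int) : Decidable (Pre_split_date_range_py start_timestamp end_timestamp max_candles) := by unfold Pre_split_date_range_py; infer_instance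

def pvWitness_split_date_range_py : Int × Int × Int := (0, 2000, 1)

def Spec_split_date_range_py (start_timestamp : Int) (end_timestamp : Int) (max_candles : Int) (out : List (Int × Int)) : Prop := out = split_date_range_py_alt start_timestamp end_timestamp max_candles
instance (start_timestamp : Int) (end_timestamp : Int) (max_candles : Int) (out : List (Int × Int)) : Decidable (Spec_split_date_range_py start_timestamp end_timestamp max_candles out) := by unfold Spec_split_date_range_py; infer_instance

-- ===== CLAIM (what is proved, stated in full; the proofs are below) =====
def Claim_equal_split_date_range_py : Prop := ∀ (start_timestamp : Int) (end_timestamp : Int) (max_candles : Int), Dom_split_date_range_py start_timestamp end_timestamp max_candles → Pre_split_date_range_py start_timestamp end_timestamp max_candles → Spec_split_date_range_py start_timestamp end_timestamp max_candles (split_date_range_py start_timestamp end_timestamp max_candles)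

-- ===== LEMMAS AND PROOFS =====

-- closed-form chunk count from a cursor position
def pvCount (d e cur : Int) : Int :=
  if e ≤ cur then 0 else PySem.Int.floordiv (e - cur + d - 1) d

lemma pvCount_of_last {d e cur : Int} (hd : 0 < d) (h1 : cur < e) (h2 : e ≤ cur + d) :
    pvCount d e cur = 1 := by
  unfold pvCount
  rw [if_neg (by omega)]
  rw [PySem.Int.floordiv_eq_iff_of_pos hd]
  constructor <;> nlinarith

lemma pvCount_step {d e cur : Int} (hd : 0 < d) (h1 : cur < e) (h2 : cur + d < e) :
    pvCount d e cur = pvCount d e (cur + d) + 1 := by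
  unfold pvCount
  rw [if_neg (by omega), if_neg (by omega)]
  rw [PySem.Int.floordiv_eq_ediv_of_pos hd, PySem.Int.floordiv_eq_ediv_of_pos hd]
  have : e - cur + d - 1 = (e - (cur + d) + d - 1) + 1 * d := by ring
  rw [this, Int.add_mul_ediv_right _ _ (by omega : d ≠ 0)]

lemma pvCount_nonneg {d e cur : Int} (hd : 0 < d) : 0 ≤ pvCount d e cur := by
  unfold pvCount
  split
  · exact le_refl 0
  · rw [PySem.Int.floordiv_eq_ediv_of_pos hd]
    exact Int.ediv_nonneg (by omega) (by omega)

-- the loop from cursor `cur` produces exactly the index-arithmetic chunks of B, shifted to `cur`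
lemma pvLoopA_closed (d e : Int) (hd : 0 < d) :
    ∀ (fuel : Nat) (cur : Int) (acc : List (Int × Int)), (e - cur).toNat < fuel →
      pvLoopA d e fuel cur acc =
        acc.reverse ++ (List.range (pvCount d e cur).toNat).map (fun (i : Nat) =>
          (cur + (i : Int) * d, min (cur + ((i : Int) + 1) * d) e)) := by
  intro fuel
  induction fuel with
  | zero => intro cur acc h; omega
  | succ f ih =>
    intro cur acc h
    by_cases hlt : cur < e
    · rw [pvLoopA, if_pos hlt]
      by_cases hle : e ≤ cur + d
      · -- last chunk
        have hce : min (cur + d) e = e := by omega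
        rw [ih _ _ (by omega)]
        have hc0 : pvCount d e e = 0 := by unfold pvCount; rw [if_pos le_rfl]
        rw [hce, hc0, pvCount_of_last hd hlt hle]
        simp [List.range_succ]
        omega
      · -- middle chunk, cursor advances by d
        rw [Int.not_le] at hle
        have hce : min (cur + d) e = cur + d := by omega
        have hb : (e - min (cur + d) e).toNat < f := by rw [hce]; omega
        rw [ih _ _ hb, hce]
        rw [pvCount_step hd hlt hle]
        have hnn := pvCount_nonneg (e := e) (cur := cur + d) hd
        have htn : (pvCount d e (cur + d) + 1).toNat = (pvCount d e (cur + d)).toNat + 1 := by omega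
        rw [htn]
        have key : (List.range ((pvCount d e (cur + d)).toNat + 1)).map (fun (i : Nat) =>
              (cur + (i : Int) * d, min (cur + ((i : Int) + 1) * d) e)) =
            (cur, cur + d) :: (List.range (pvCount d e (cur + d)).toNat).map (fun (i : Nat) =>
              (cur + d + (i : Int) * d, min (cur + d + ((i : Int) + 1) * d) e)) := by
          rw [List.range_succ_eq_map, List.map_cons, List.map_map]
          congr 1
          · simp only [Nat.cast_zero, zero_mul, add_zero, zero_add, one_mul, hce]
          · apply List.map_congr_left
            intro i _
            simp only [Function.comp_apply, Prod.mk.injEq]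
            refine ⟨by push_cast; ring, ?_⟩
            congr 1
            push_cast
            ring
        rw [key]
        simp
    · rw [pvLoopA, if_neg hlt]
      have : pvCount d e cur = 0 := by unfold pvCount; rw [if_pos (by omega)]
      simp [this]

-- ===== VERDICT (by name: the statement is the Claim_ definition above) =====
theorem split_date_range_py_spec : Claim_equal_split_date_range_py := by
  intro s e mc _ hpre
  unfold Spec_split_date_range_py split_date_range_py split_date_range_py_alt
  by_cases hlt : s < e
  · have hd : 0 < mc * 900 := by have := hpre hlt; positivity
    rw [pvLoopA_closed _ _ hd _ _ _ (by omega)]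
    simp only [List.reverse_nil, List.nil_append]
    unfold pvCount
    rw [if_neg (by omega)]
  · have h0 : (e - s).toNat + 1 = 0 + 1 := by omega
    rw [h0, pvLoopA, if_neg hlt]
    simp [show e ≤ s by omega]
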